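-- pv_equiv track=rewrite | github.com/egeersu/Multihop-GNN | mlp_baselines/run_baselines.py | candidates_per_query
-- ===== SOURCE A (Python) =====
-- def candidates_per_query(dataset):
--     query_memory = {}
--     for sample in dataset:
--         query = sample['query'].split()[0]
--         if query not in query_memory:
--             query_memory[query] = {}
--         if sample['answer'] not in query_memory[query]:
--             query_memory[query][sample['answer']] = 1
--         else:
--             query_memory[query][sample['answer']] += 1
--
--     return query_memory
-- ===== SOURCE B (Python) =====
-- def candidates_per_query(dataset):
--     pair_counts = {}
--     for sample in dataset:
--         qa = (sample['query'].split()[0], sample['answer'])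
--         pair_counts[qa] = pair_counts.get(qa, 0) + 1
--     query_memory = {}
--     for (query, answer), count in pair_counts.items():
--         query_memory.setdefault(query, {})[answer] = count
--     return query_memory
-- ===== Notes on version B (the rewrite author's own statement) =====
-- stated objective: alternative
-- what changed: A maintains a nested dict-of-dicts and does a lookup-then-increment on the inner dict for every sample; B counts with a single flat dict keyed by (query, answer) pairs and then regroups that flat counter into the nested shape in a separate pass.
import Mathlib
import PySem

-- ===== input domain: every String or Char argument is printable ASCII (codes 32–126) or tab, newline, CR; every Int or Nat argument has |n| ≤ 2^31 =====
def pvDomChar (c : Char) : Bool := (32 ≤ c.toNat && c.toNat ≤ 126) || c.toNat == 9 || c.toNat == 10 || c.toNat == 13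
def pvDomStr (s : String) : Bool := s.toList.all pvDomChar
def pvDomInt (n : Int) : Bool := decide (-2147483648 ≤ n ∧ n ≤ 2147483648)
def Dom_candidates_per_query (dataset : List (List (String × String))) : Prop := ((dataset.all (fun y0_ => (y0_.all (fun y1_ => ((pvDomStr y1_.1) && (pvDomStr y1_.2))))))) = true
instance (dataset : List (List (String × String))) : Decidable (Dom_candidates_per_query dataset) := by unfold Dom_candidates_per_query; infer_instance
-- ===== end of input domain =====

-- B replaces A's nested lookup-then-increment dict of dicts by a flat counting dict keyed by
-- (query, answer) pairs followed by a separate regrouping pass (objective: alternative).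

-- ===== PORT A =====
-- shared extraction of sample['query'].split()[0] and sample['answer'] (identical in both Pythons)
def cpqKey (sample : List (String × String)) : String :=
  (PySem.Str.split₀ (((PySem.Dict.mk sample).get? "query").getD "")).headD ""

def cpqAns (sample : List (String × String)) : String :=
  ((PySem.Dict.mk sample).get? "answer").getD ""

-- one iteration of A's loop body
def cpqStepA (mem : PySem.Dict String (PySem.Dict String Int))
    (sample : List (String × String)) : PySem.Dict String (PySem.Dict String Int) :=
  let q := cpqKey sample
  let mem := if mem.contains q then mem else mem.insert q PySem.Dict.empty
  let a := cpqAns sample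
  let inner := mem.getD q PySem.Dict.empty
  let inner := if inner.contains a then inner.modify a 0 (· + 1) else inner.insert a 1
  mem.insert q inner

def candidates_per_query (dataset : List (List (String × String))) : List (String × List (String × Int)) :=
  ((dataset.foldl cpqStepA PySem.Dict.empty).items).map (fun p => (p.1, p.2.items))

-- ===== PORT B =====
-- B phase 1: pair_counts[(q, a)] = pair_counts.get((q, a), 0) + 1
def cpqFlatStep (pc : PySem.Dict (String × String) Int)
    (sample : List (String × String)) : PySem.Dict (String × String) Int :=
  let qa := (cpqKey sample, cpqAns sample)
  pc.insert qa (pc.getD qa 0 + 1)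

-- B phase 2: query_memory.setdefault(q, {})[a] = c  (= modify q with default {})
def cpqRegroupStep (res : PySem.Dict String (PySem.Dict String Int))
    (x : (String × String) × Int) : PySem.Dict String (PySem.Dict String Int) :=
  res.modify x.1.1 PySem.Dict.empty (fun inner => inner.insert x.1.2 x.2)

def candidates_per_query_alt (dataset : List (List (String × String))) : List (String × List (String × Int)) :=
  let pairCounts := dataset.foldl cpqFlatStep PySem.Dict.empty
  ((pairCounts.items.foldl cpqRegroupStep PySem.Dict.empty).items).map (fun p => (p.1, p.2.items))

-- ===== PRECONDITION & SPEC =====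
-- Pre_ excludes exactly the inputs where the Python A raises: a sample without a 'query' or
-- 'answer' key (KeyError) or whose query is empty/whitespace-only so split()[0] is an IndexError.
def Pre_candidates_per_query (dataset : List (List (String × String))) : Prop :=
  ∀ sample ∈ dataset,
    ((PySem.Dict.mk sample).get? "query").isSome = true ∧
    PySem.Str.split₀ (((PySem.Dict.mk sample).get? "query").getD "") ≠ [] ∧
    ((PySem.Dict.mk sample).get? "answer").isSome = true

instance (dataset : List (List (String × String))) : Decidable (Pre_candidates_per_query dataset) := by
  unfold Pre_candidates_per_query; infer_instance

def pvWitness_candidates_per_query : (List (List (String × String))) :=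
  [[("query", "q1 foo"), ("answer", "a")], [("query", "q1 bar"), ("answer", "a")]]

def Spec_candidates_per_query (dataset : List (List (String × String))) (out : List (String × List (String × Int))) : Prop := out = candidates_per_query_alt dataset
instance (dataset : List (List (String × String))) (out : List (String × List (String × Int))) : Decidable (Spec_candidates_per_query dataset out) := by unfold Spec_candidates_per_query; infer_instance

-- ===== CLAIM (what is proved, stated in full; the proofs are below) =====
def Claim_equal_candidates_per_query : Prop := ∀ (dataset : List (List (String × String))), Dom_candidates_per_query dataset → Pre_candidates_per_query dataset → Spec_candidates_per_query dataset (candidates_per_query dataset)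

-- ===== LEMMAS AND PROOFS =====

-- regroup of a flat (pair → count) item list, B's second phase as a function
def cpqRegroup (l : List ((String × String) × Int)) : PySem.Dict String (PySem.Dict String Int) :=
  l.foldl cpqRegroupStep PySem.Dict.empty

-- modify is insert of the updated value
theorem cpqModify_eq_insert (d : PySem.Dict String Int) (k : String) (d0 : Int) (f : Int → Int) :
    d.modify k d0 f = d.insert k (f (d.getD k d0)) :=
  PySem.Dict.ext_iff.mpr rfl

theorem cpqModify_eq_insert' (d : PySem.Dict String (PySem.Dict String Int)) (k : String)
    (f : PySem.Dict String Int → PySem.Dict String Int) :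
    d.modify k PySem.Dict.empty f = d.insert k (f (d.getD k PySem.Dict.empty)) :=
  PySem.Dict.ext_iff.mpr rfl

-- a regroup step is an insert of the updated inner dict
theorem cpqRegroupStep_def (R : PySem.Dict String (PySem.Dict String Int))
    (x : (String × String) × Int) :
    cpqRegroupStep R x = R.insert x.1.1 ((R.getD x.1.1 PySem.Dict.empty).insert x.1.2 x.2) :=
  PySem.Dict.ext_iff.mpr rfl

-- first-match lookup splits over an appended item list
theorem cpqGet?_mk_append (l : List ((String × String) × Int)) (p : (String × String) × Int)
    (k : String × String) :
    (PySem.Dict.mk (l ++ [p])).get? k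
      = ((PySem.Dict.mk l).get? k).orElse (fun _ => if p.1 == k then some p.2 else none) := by
  obtain ⟨pk, pv⟩ := p
  induction l with
  | nil =>
    have h0 : (PySem.Dict.mk ([] : List ((String × String) × Int))).get? k = none := rfl
    simp only [List.nil_append, PySem.Dict.get?_mk_cons, h0]
    split <;> rfl
  | cons q rest ih =>
    obtain ⟨qk, qv⟩ := q
    simp only [List.cons_append, PySem.Dict.get?_mk_cons, ih]
    by_cases h : qk == k
    · simp only [h, if_pos]; rfl
    · simp only [h, Bool.false_eq_true, if_false]

-- LOOK: the regrouped nested lookup of (q, a) is the flat lookup, given unique pair keys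
theorem cpqLook (l : List ((String × String) × Int)) (hnd : (l.map (·.1)).Nodup)
    (q a : String) :
    ((cpqRegroup l).getD q PySem.Dict.empty).get? a = (PySem.Dict.mk l).get? (q, a) := by
  induction l using List.reverseRecOn with
  | nil => rfl
  | append_singleton l p ih =>
    rw [List.map_append, List.nodup_append] at hnd
    obtain ⟨hl, -, hdisj⟩ := hnd
    have hpnot : p.1 ∉ l.map (·.1) := fun hmem => hdisj _ hmem p.1 (by simp) rfl
    rw [cpqGet?_mk_append]
    unfold cpqRegroup at *
    rw [List.foldl_append, List.foldl_cons, List.foldl_nil, cpqRegroupStep_def,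
        PySem.Dict.getD_insert]
    by_cases hq : q = p.1.1
    · subst hq
      rw [if_pos rfl]
      by_cases ha : a = p.1.2
      · subst ha
        rw [PySem.Dict.get?_insert_self]
        have hnone : (PySem.Dict.mk l).get? (p.1.1, p.1.2) = none := by
          rw [PySem.Dict.get?_eq_none_iff_not_mem_keys]
          simpa [PySem.Dict.keys] using hpnot
        simp [hnone, Option.orElse]
      · rw [PySem.Dict.get?_insert_of_ne _ _ ha, ih hl]
        have hne : (p.1 == ((p.1.1, a) : String × String)) = false :=
          beq_eq_false_iff_ne.mpr (fun h => ha (congrArg Prod.snd h).symm)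
        rw [hne]
        cases (PySem.Dict.mk l).get? (p.1.1, a) <;> rfl
    · rw [if_neg hq, ih hl]
      have hne : (p.1 == ((q, a) : String × String)) = false :=
        beq_eq_false_iff_ne.mpr (fun h => hq (congrArg Prod.fst h).symm)
      rw [hne]
      cases (PySem.Dict.mk l).get? (q, a) <;> rfl

-- two in-place overwrites at distinct keys commute (inner dicts and outer dicts)
theorem cpqInsComm {ν : Type} (d : PySem.Dict String ν) (k k' : String) (v w : ν)
    (hc : d.contains k = true) (hne : k ≠ k') :
    (d.insert k v).insert k' w = (d.insert k' w).insert k v := by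
  have c2 : (d.insert k' w).contains k = true := by
    rw [PySem.Dict.contains_insert, hc]; simp
  by_cases hc' : d.contains k' = true
  · have c1 : (d.insert k v).contains k' = true := by
      rw [PySem.Dict.contains_insert, hc']; simp
    apply PySem.Dict.ext
    rw [PySem.Dict.items_insert_of_contains _ _ c1, PySem.Dict.items_insert_of_contains _ _ hc,
        PySem.Dict.items_insert_of_contains _ _ c2, PySem.Dict.items_insert_of_contains _ _ hc']
    simp only [List.map_map]
    refine List.map_congr_left fun p _ => ?_
    simp only [Function.comp_apply]
    by_cases h1 : p.1 = k <;> by_cases h2 : p.1 = k' <;>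
      simp_all [beq_iff_eq]
  · have hcf : d.contains k' = false := by simpa using hc'
    have c1 : (d.insert k v).contains k' = false := by
      rw [PySem.Dict.contains_insert, hcf]
      simp [beq_eq_false_iff_ne.mpr (fun h => hne h.symm)]
    apply PySem.Dict.ext
    rw [PySem.Dict.items_insert_of_not_contains _ _ c1, PySem.Dict.items_insert_of_contains _ _ hc,
        PySem.Dict.items_insert_of_contains _ _ c2, PySem.Dict.items_insert_of_not_contains _ _ hcf,
        List.map_append]
    congr 1
    have hkk : (k' == k) = false := beq_eq_false_iff_ne.mpr (fun h => hne h.symm)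
    simp only [List.map_cons, List.map_nil, hkk, Bool.false_eq_true, if_false]

-- two regroup steps at distinct pair keys commute when the first pair is already present
theorem cpqStepComm (R : PySem.Dict String (PySem.Dict String Int))
    (q a : String) (v : Int) (y : (String × String) × Int)
    (hq : R.contains q = true) (ha : (R.getD q PySem.Dict.empty).contains a = true)
    (hne : y.1 ≠ (q, a)) :
    cpqRegroupStep (cpqRegroupStep R ((q, a), v)) y
      = cpqRegroupStep (cpqRegroupStep R y) ((q, a), v) := by
  obtain ⟨⟨q', a'⟩, c⟩ := y
  simp only [cpqRegroupStep, cpqModify_eq_insert']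
  by_cases hqq : q' = q
  · subst hqq
    have haa : a' ≠ a := by intro h; exact hne (by rw [h])
    rw [PySem.Dict.getD_insert_self, PySem.Dict.insert_insert_self,
        PySem.Dict.getD_insert_self, PySem.Dict.insert_insert_self,
        cpqInsComm _ _ _ _ _ ha (fun h => haa h.symm)]
  · rw [PySem.Dict.getD_insert_of_ne _ _ _ hqq, PySem.Dict.getD_insert_of_ne _ _ _
        (fun h => hqq h.symm), cpqInsComm _ _ _ _ _ hq (fun h => hqq h.symm)]

-- present pairs stay present through a regroup
theorem cpqMem (l : List ((String × String) × Int)) (hnd : (l.map (·.1)).Nodup)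
    (q a : String) (hmem : (q, a) ∈ l.map (·.1)) :
    (cpqRegroup l).contains q = true ∧
    ((cpqRegroup l).getD q PySem.Dict.empty).contains a = true := by
  have hsome : (PySem.Dict.mk l).get? (q, a) ≠ none := by
    rw [Ne, PySem.Dict.get?_eq_none_iff_not_mem_keys]
    simpa [PySem.Dict.keys] using hmem
  have hlook := cpqLook l hnd q a
  constructor
  · by_contra hnc
    have : (cpqRegroup l).getD q PySem.Dict.empty = PySem.Dict.empty :=
      PySem.Dict.getD_of_not_contains _ _ (by simpa using hnc)
    rw [this, PySem.Dict.get?_empty] at hlook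
    exact hsome hlook.symm
  · rw [PySem.Dict.contains_eq_isSome_get?, hlook]
    cases h : (PySem.Dict.mk l).get? (q, a) with
    | none => exact absurd h hsome
    | some _ => rfl

-- in-place value overwrite in the flat list = one regroup step on the regrouped dict
theorem cpqBump (l : List ((String × String) × Int)) (hnd : (l.map (·.1)).Nodup)
    (k : String × String) (v : Int) (hmem : k ∈ l.map (·.1)) :
    cpqRegroup (l.map (fun p => if p.1 == k then (k, v) else p))
      = cpqRegroupStep (cpqRegroup l) (k, v) := by
  induction l using List.reverseRecOn with
  | nil => simp at hmem
  | append_singleton l p ih =>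
    obtain ⟨pk, pv⟩ := p
    rw [List.map_append] at hnd
    have hl : (l.map (·.1)).Nodup := (List.nodup_append.mp hnd).1
    have hdisj := (List.nodup_append.mp hnd).2.2
    have hpnot : pk ∉ l.map (·.1) := fun hm => hdisj _ hm pk (by simp) rfl
    unfold cpqRegroup at *
    by_cases hp : pk = k
    · subst hp
      have hmap : l.map (fun p => if p.1 == pk then (pk, v) else p) = l := by
        conv_rhs => rw [← List.map_id l]
        refine List.map_congr_left fun x hx => ?_
        have hxk : x.1 ≠ pk := fun h => hpnot (h ▸ List.mem_map_of_mem hx)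
        simp [beq_eq_false_iff_ne.mpr hxk]
      have hbump : (if ((pk, pv) : (String × String) × Int).1 == pk then (pk, v)
          else (pk, pv)) = (pk, v) := by simp
      simp only [List.map_append, List.map_cons, List.map_nil, hmap, hbump,
        List.foldl_append, List.foldl_cons, List.foldl_nil]
      obtain ⟨q, a⟩ := pk
      simp only [cpqRegroupStep_def]
      rw [PySem.Dict.getD_insert_self, PySem.Dict.insert_insert_self,
          PySem.Dict.insert_insert_self]
    · have hkmem : k ∈ l.map (·.1) := by
        rw [List.map_append, List.mem_append] at hmem
        rcases hmem with h | h
        · exact h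
        · have hk : k = pk := by simpa using h
          exact absurd hk.symm hp
      have hbump : (if ((pk, pv) : (String × String) × Int).1 == k then (k, v)
          else (pk, pv)) = (pk, pv) := by simp [beq_eq_false_iff_ne.mpr hp]
      simp only [List.map_append, List.map_cons, List.map_nil, hbump,
        List.foldl_append, List.foldl_cons, List.foldl_nil]
      rw [ih hl hkmem]
      obtain ⟨hq, ha⟩ := cpqMem l hl k.1 k.2 (by simpa using hkmem)
      exact cpqStepComm _ k.1 k.2 v (pk, pv) hq ha (by simpa using hp)


-- regroup commutes with a flat insert
theorem cpqRegroup_insert (pc : PySem.Dict (String × String) Int)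
    (hnd : pc.keys.Nodup) (k : String × String) (v : Int) :
    cpqRegroup ((pc.insert k v).items) = cpqRegroupStep (cpqRegroup pc.items) (k, v) := by
  by_cases hc : pc.contains k
  · rw [PySem.Dict.items_insert_of_contains _ _ hc]
    exact cpqBump pc.items hnd k v
      (by rwa [← PySem.Dict.keys, ← PySem.Dict.contains_iff_mem_keys])
  · rw [PySem.Dict.items_insert_of_not_contains _ _ (by simpa using hc)]
    unfold cpqRegroup
    rw [List.foldl_append, List.foldl_cons, List.foldl_nil]

-- one iteration of A's loop = regroup of one flat-counting iteration
theorem cpqStep_comm (pc : PySem.Dict (String × String) Int) (hnd : pc.keys.Nodup)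
    (sample : List (String × String)) :
    cpqStepA (cpqRegroup pc.items) sample = cpqRegroup ((cpqFlatStep pc sample).items) := by
  set q := cpqKey sample
  set a := cpqAns sample
  rw [show cpqFlatStep pc sample = pc.insert (q, a) (pc.getD (q, a) 0 + 1) from rfl,
      cpqRegroup_insert pc hnd, show ((q, a), pc.getD (q, a) 0 + 1)
        = (((q, a) : String × String), pc.getD (q, a) 0 + 1) from rfl]
  simp only [cpqRegroupStep, cpqModify_eq_insert']
  have hlook : ((cpqRegroup pc.items).getD q PySem.Dict.empty).get? a = pc.get? (q, a) :=
    cpqLook pc.items hnd q a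
  simp only [cpqStepA]
  set R := cpqRegroup pc.items with hR
  by_cases hq : R.contains q
  · rw [if_pos hq]
    set inner := R.getD q PySem.Dict.empty with hinner
    by_cases ha : inner.contains a
    · rw [if_pos ha, cpqModify_eq_insert]
      have : inner.getD a 0 = pc.getD (q, a) 0 := by
        rw [PySem.Dict.getD_eq_get?_getD, PySem.Dict.getD_eq_get?_getD, hlook]
      rw [this]
    · rw [if_neg ha]
      have h0 : pc.getD (q, a) 0 = 0 := by
        rw [PySem.Dict.getD_eq_get?_getD, ← hlook,
            (PySem.Dict.get?_eq_none_iff_contains _ _).mpr (by simpa using ha)]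
        rfl
      rw [h0]
      norm_num
      rfl
  · rw [if_neg hq]
    have hre : R.getD q PySem.Dict.empty = PySem.Dict.empty :=
      PySem.Dict.getD_of_not_contains _ _ (by simpa using hq)
    have hget : (R.insert q PySem.Dict.empty).getD q PySem.Dict.empty = PySem.Dict.empty := by
      rw [PySem.Dict.getD_insert_self]
    rw [hget, PySem.Dict.contains_empty, if_neg (by simp), PySem.Dict.insert_insert_self, hre]
    have h0 : pc.getD (q, a) 0 = 0 := by
      rw [PySem.Dict.getD_eq_get?_getD, ← hlook, hre, PySem.Dict.get?_empty]; rfl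
    rw [h0]
    norm_num
    rfl

-- the whole loops: A's fold is the regroup of B's flat fold
theorem cpqFold_comm (l : List (List (String × String)))
    (pc : PySem.Dict (String × String) Int) (hnd : pc.keys.Nodup) :
    l.foldl cpqStepA (cpqRegroup pc.items) = cpqRegroup ((l.foldl cpqFlatStep pc).items) := by
  induction l generalizing pc with
  | nil => rfl
  | cons s rest ih =>
    rw [List.foldl_cons, List.foldl_cons, cpqStep_comm pc hnd s]
    exact ih (cpqFlatStep pc s) (by
      unfold cpqFlatStep
      exact PySem.Dict.nodup_keys_insert _ _ _ hnd)

-- ===== VERDICT (by name: the statement is the Claim_ definition above) =====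
theorem candidates_per_query_spec : Claim_equal_candidates_per_query := by
  intro dataset _ _
  unfold Spec_candidates_per_query candidates_per_query candidates_per_query_alt
  rw [show (PySem.Dict.empty : PySem.Dict String (PySem.Dict String Int))
        = cpqRegroup ((PySem.Dict.empty : PySem.Dict (String × String) Int)).items from rfl,
      cpqFold_comm _ _ PySem.Dict.nodup_keys_empty]
  rfl
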